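-- pv_equiv track=rewrite | github.com/coldenmaster/bbl_api | bbl_api/api01/em_parse.py | reverse_hex_string
-- ===== SOURCE A (Python) =====
-- def reverse_hex_string(str):
--     if len(str) % 2 != 0:
--         str = "0" + str
--     sb = ""
--     for i in range(len(str) - 2, -1, -2):
--         sb += str[i]
--         sb += str[i + 1]
--     return sb
-- ===== SOURCE B (Python) =====
-- def reverse_hex_string(str):
--     if len(str) % 2 != 0:
--         str = "0" + str
--     pairs = [str[i:i + 2] for i in range(0, len(str), 2)]
--     return ''.join(reversed(pairs))
-- ===== Notes on version B (the rewrite author's own statement) =====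
-- stated objective: simpler
-- what changed: Instead of walking character indices backwards two at a time while concatenating each pair onto an accumulator string, B splits the padded string into the list of 2-character chunks once and returns a single reverse-and-join of that list.
import Mathlib
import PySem

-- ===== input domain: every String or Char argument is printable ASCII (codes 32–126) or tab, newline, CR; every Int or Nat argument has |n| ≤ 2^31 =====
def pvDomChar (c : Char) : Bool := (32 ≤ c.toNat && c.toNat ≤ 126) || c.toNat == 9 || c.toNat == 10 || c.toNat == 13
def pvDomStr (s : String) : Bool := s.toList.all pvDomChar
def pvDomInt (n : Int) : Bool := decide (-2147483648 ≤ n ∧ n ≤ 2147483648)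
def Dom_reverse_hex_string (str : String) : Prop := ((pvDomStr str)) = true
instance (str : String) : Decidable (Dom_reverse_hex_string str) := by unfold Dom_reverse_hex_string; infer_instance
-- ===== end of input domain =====

-- B replaces A's backwards two-at-a-time index walk (string concatenation in a loop) by one chunk-split followed by a single reverse-and-join.


-- ===== PORT A =====
-- A: pad to even length, then walk i = len-2, len-4, …, 0 appending str[i], str[i+1] to an accumulator.
def reverse_hex_string (str : String) : String :=
  let cs0 := str.toList
  let cs := if PySem.Int.mod (PySem.List.len cs0) 2 ≠ 0 then '0' :: cs0 else cs0
  let sb : List Char :=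
    (PySem.List.pyRange (PySem.List.len cs - 2) (-1) (-2)).foldl
      (fun sb i => (sb ++ [PySem.List.pyGetD cs i '0']) ++ [PySem.List.pyGetD cs (i + 1) '0']) []
  String.ofList sb

-- ===== PORT B =====
-- B: pad to even length, split into the list of 2-char slices [str[i:i+2] for i in range(0, len, 2)], join it reversed.
def reverse_hex_string_alt (str : String) : String :=
  let cs0 := str.toList
  let cs := if PySem.Int.mod (PySem.List.len cs0) 2 ≠ 0 then '0' :: cs0 else cs0
  let pairs := (PySem.List.pyRange 0 (PySem.List.len cs) 2).map
      (fun i => PySem.List.slice cs (some i) (some (i + 2)))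
  String.ofList (PySem.Chars.join [] pairs.reverse)

-- ===== PRECONDITION & SPEC =====
def Spec_reverse_hex_string (str : String) (out : String) : Prop := out = reverse_hex_string_alt str
instance (str : String) (out : String) : Decidable (Spec_reverse_hex_string str out) := by unfold Spec_reverse_hex_string; infer_instance

-- ===== CLAIM (what is proved, stated in full; the proofs are below) =====
def Claim_equal_reverse_hex_string : Prop := ∀ (str : String), Dom_reverse_hex_string str → Spec_reverse_hex_string str (reverse_hex_string str)

-- ===== LEMMAS AND PROOFS =====

-- range(a, b, -2) peels its first element
lemma pyRange_neg_two (a b : Int) (h : b < a) :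
    PySem.List.pyRange a b (-2) = a :: PySem.List.pyRange (a - 2) b (-2) := by
  simp only [PySem.List.pyRange]
  norm_num [if_pos h]
  by_cases h2 : b < a - 2
  · have hN : ((a - b + 2 - 1) / 2).toNat = ((a - 2 - b + 2 - 1) / 2).toNat + 1 := by omega
    rw [if_pos h2, hN, List.range_succ_eq_map, List.map_cons, List.map_map]
    simp only [List.cons.injEq]
    refine ⟨by ring, List.map_congr_left (fun k _ => ?_)⟩
    simp only [Function.comp]
    push_cast
    ring
  · have hN : ((a - b + 2 - 1) / 2).toNat = 1 := by omega
    rw [if_neg h2, hN]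
    simp

-- range(a, b, 2) peels its first element
lemma pyRange_pos_two (a b : Int) (h : a < b) :
    PySem.List.pyRange a b 2 = a :: PySem.List.pyRange (a + 2) b 2 := by
  simp only [PySem.List.pyRange]
  norm_num [if_pos h]
  by_cases h2 : a + 2 < b
  · have hN : ((b - a + 2 - 1) / 2).toNat = ((b - (a + 2) + 2 - 1) / 2).toNat + 1 := by omega
    rw [if_pos h2, hN, List.range_succ_eq_map, List.map_cons, List.map_map]
    simp only [List.cons.injEq]
    refine ⟨by ring, List.map_congr_left (fun k _ => ?_)⟩
    simp only [Function.comp]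
    push_cast
    ring
  · have hN : ((b - a + 2 - 1) / 2).toNat = 1 := by omega
    rw [if_neg h2, hN]
    simp

-- A's loop indices: range(2k-2, -1, -2) are the even indices 2k-2, …, 2, 0
lemma rangeA (k : Nat) :
    PySem.List.pyRange (2 * (k : Int) - 2) (-1) (-2)
      = (List.range k).reverse.map (fun (j : Nat) => 2 * (j : Int)) := by
  induction k with
  | zero =>
    simp only [PySem.List.pyRange]
    norm_num
  | succ k ih =>
    rw [pyRange_neg_two _ _ (by omega)]
    have e1 : 2 * ((k : Int) + 1) - 2 - 2 = 2 * (k : Int) - 2 := by ring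
    have e2 : 2 * (((k : Nat) + 1 : Nat) : Int) - 2 = 2 * ((k : Int) + 1) - 2 := by push_cast; ring
    rw [e2, e1, ih, List.range_succ, List.reverse_append, List.reverse_singleton,
        List.singleton_append, List.map_cons]
    simp only [List.cons.injEq]
    constructor
    · ring
    · trivial

-- B's comprehension indices: range(a, a+2k, 2) are a, a+2, …, a+2k-2
lemma rangeB (k : Nat) : ∀ a : Nat,
    PySem.List.pyRange (a : Int) ((a : Int) + 2 * (k : Int)) 2
      = (List.range k).map (fun (j : Nat) => (a : Int) + 2 * (j : Int)) := by
  induction k with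
  | zero =>
    intro a
    simp only [PySem.List.pyRange]
    norm_num
  | succ k ih =>
    intro a
    rw [pyRange_pos_two _ _ (by push_cast; omega)]
    have e1 : (a : Int) + 2 = ((a + 2 : Nat) : Int) := by push_cast; ring
    have e2 : (a : Int) + 2 * (((k : Nat) + 1 : Nat) : Int) = ((a + 2 : Nat) : Int) + 2 * (k : Int) := by
      push_cast; ring
    rw [e2, e1, ih (a + 2), List.range_succ_eq_map, List.map_cons, List.map_map]
    simp only [List.cons.injEq]
    refine ⟨by norm_num, List.map_congr_left (fun j _ => ?_)⟩
    simp only [Function.comp]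
    push_cast
    ring

-- ''.join with the empty separator is flatten
lemma join_nil_eq_flatten (L : List (List Char)) : PySem.Chars.join [] L = L.flatten := by
  induction L with
  | nil => simp [PySem.Chars.join_nil]
  | cons p rest ih =>
    cases rest with
    | nil => simp [PySem.Chars.join_singleton]
    | cons q rest2 =>
      rw [PySem.Chars.join_cons_cons, ih]
      simp

-- the 2-char chunk at even index 2j, as A's two indexings and as B's slice
lemma chunk_eq (cs : List Char) (j k : Nat) (hk : cs.length = 2 * k) (hj : j < k) :
    [PySem.List.pyGetD cs (2 * (j : Int)) '0', PySem.List.pyGetD cs (2 * (j : Int) + 1) '0']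
      = (cs.drop (2 * j)).take 2 := by
  have h0 : 2 * j < cs.length := by omega
  have h1 : 2 * j + 1 < cs.length := by omega
  have e1 : (2 * (j : Int) + 1) = ((2 * j + 1 : Nat) : Int) := by push_cast; ring
  have e0 : (2 * (j : Int)) = ((2 * j : Nat) : Int) := by push_cast; ring
  rw [e1, e0, PySem.List.pyGetD_natCast, PySem.List.pyGetD_natCast]
  simp only [List.getD_eq_getElem?_getD, List.getElem?_eq_getElem h0, List.getElem?_eq_getElem h1,
    Option.getD_some]
  rw [List.drop_eq_getElem_cons h0, List.drop_eq_getElem_cons (show 2 * j + 1 < cs.length from h1)]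
  simp only [List.take_succ_cons, List.take_zero]

-- core fact: on any even-length char list, A's backwards index walk equals B's reverse-join of the chunk list
lemma core (cs : List Char) (k : Nat) (hk : cs.length = 2 * k) :
    (PySem.List.pyRange (PySem.List.len cs - 2) (-1) (-2)).foldl
        (fun sb i => (sb ++ [PySem.List.pyGetD cs i '0']) ++ [PySem.List.pyGetD cs (i + 1) '0']) []
      = PySem.Chars.join []
          (((PySem.List.pyRange 0 (PySem.List.len cs) 2).map
              (fun i => PySem.List.slice cs (some i) (some (i + 2)))).reverse) := by
  have hlen : PySem.List.len cs = 2 * (k : Int) := by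
    rw [PySem.List.len_eq, hk]; push_cast; ring
  have hL :
      (PySem.List.pyRange (PySem.List.len cs - 2) (-1) (-2)).foldl
          (fun sb i => (sb ++ [PySem.List.pyGetD cs i '0']) ++ [PySem.List.pyGetD cs (i + 1) '0']) []
        = ((List.range k).reverse.map
            (fun (j : Nat) => [PySem.List.pyGetD cs (2 * (j : Int)) '0',
                       PySem.List.pyGetD cs (2 * (j : Int) + 1) '0'])).flatten := by
    rw [hlen, rangeA k, List.foldl_map]
    have := PySem.List.foldl_append_eq_flatMap
      (fun (j : Nat) => [PySem.List.pyGetD cs (2 * (j : Int)) '0',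
                 PySem.List.pyGetD cs (2 * (j : Int) + 1) '0'])
      (List.range k).reverse []
    simp only [List.append_assoc, List.singleton_append] at this ⊢
    rw [this, List.flatMap_def, List.nil_append]
  have hR :
      PySem.Chars.join []
          (((PySem.List.pyRange 0 (PySem.List.len cs) 2).map
              (fun i => PySem.List.slice cs (some i) (some (i + 2)))).reverse)
        = ((List.range k).reverse.map (fun (j : Nat) => (cs.drop (2 * j)).take 2)).flatten := by
    have h0 : PySem.List.pyRange 0 (PySem.List.len cs) 2
        = (List.range k).map (fun (j : Nat) => 2 * (j : Int)) := by
      rw [hlen]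
      have := rangeB k 0
      simp only [Nat.cast_zero, zero_add] at this
      rw [this]
    rw [h0, join_nil_eq_flatten, List.map_map, ← List.map_reverse]
    congr 1
    refine List.map_congr_left (fun j hj => ?_)
    have hjk : j < k := List.mem_range.mp (List.mem_reverse.mp hj)
    simp only [Function.comp]
    have e0 : (2 * (j : Int)) = ((2 * j : Nat) : Int) := by push_cast; ring
    have e2 : (2 * (j : Int) + 2) = ((2 * j : Nat) : Int) + ((2 : Nat) : Int) := by push_cast; ring
    rw [e2, e0]
    exact PySem.List.slice_natCast_add cs (2 * j) 2
  rw [hL, hR]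
  congr 1
  refine List.map_congr_left (fun j hj => ?_)
  have hjk : j < k := List.mem_range.mp (List.mem_reverse.mp hj)
  exact chunk_eq cs j k hk hjk

-- the padded list always has even length
lemma padded_even (cs0 : List Char) :
    ∃ k : Nat, (if PySem.Int.mod (PySem.List.len cs0) 2 ≠ 0 then '0' :: cs0 else cs0).length = 2 * k := by
  have hm : PySem.Int.mod (PySem.List.len cs0) 2 = ((cs0.length % 2 : Nat) : Int) := by
    rw [PySem.List.len_eq]
    exact_mod_cast PySem.Int.mod_natCast cs0.length 2
  by_cases h : cs0.length % 2 = 0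
  · refine ⟨cs0.length / 2, ?_⟩
    have hnot : ¬ PySem.Int.mod (PySem.List.len cs0) 2 ≠ 0 := by rw [hm, h]; simp
    rw [if_neg hnot]
    omega
  · refine ⟨(cs0.length + 1) / 2, ?_⟩
    have hyes : PySem.Int.mod (PySem.List.len cs0) 2 ≠ 0 := by
      rw [hm]; exact_mod_cast Int.natCast_ne_zero.mpr h
    rw [if_pos hyes]
    simp only [List.length_cons]
    omega

-- ===== VERDICT (by name: the statement is the Claim_ definition above) =====
theorem reverse_hex_string_spec : Claim_equal_reverse_hex_string := by
  intro str _
  unfold Spec_reverse_hex_string reverse_hex_string reverse_hex_string_alt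
  obtain ⟨k, hk⟩ := padded_even str.toList
  exact congrArg String.ofList (core _ k hk)
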